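-- pv_equiv track=rewrite | github.com/Astroboyjj/AlgoProject2 | P2main.py | unMerge
-- ===== SOURCE A (Python) =====
-- def unMerge(chunk):
--     if len(chunk) > 2:
--         L = chunk[::2]
--         R = chunk[1::2]
--         L = unMerge(L)
--         R = unMerge(R)
--         chunk = L + R
--     elif len(chunk) == 2:
--         chunk.reverse()
--     return chunk
-- ===== SOURCE B (Python) =====
-- def unMerge(chunk):
--     # Iterative version: explicit stack builds the split tree in pre-order,
--     # then results are recombined bottom-up in one reverse pass.
--     # Like the original, a length-2 argument is reversed in place and returned.
--     if len(chunk) <= 1: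
--         return chunk
--     if len(chunk) == 2:
--         chunk.reverse()
--         return chunk
--     nodes = []
--     stack = [chunk]
--     while stack:
--         c = stack.pop()
--         nodes.append(c)
--         if len(c) > 2:
--             stack.append(c[1::2])
--             stack.append(c[::2])
--     done = []
--     for c in reversed(nodes):
--         if len(c) > 2:
--             L = done.pop()
--             R = done.pop()
--             done.append(L + R)
--         elif len(c) == 2:
--             done.append(c[::-1])
--         else:
--             done.append(c)
--     return done[0]
-- ===== Notes on version B (the rewrite author's own statement) =====
-- stated objective: alternative
-- what changed: Replaces the recursion with an explicit stack that lists the split tree in pre-order and a single reverse pass that recombines the pieces bottom-up with a results stack.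
import Mathlib
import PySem

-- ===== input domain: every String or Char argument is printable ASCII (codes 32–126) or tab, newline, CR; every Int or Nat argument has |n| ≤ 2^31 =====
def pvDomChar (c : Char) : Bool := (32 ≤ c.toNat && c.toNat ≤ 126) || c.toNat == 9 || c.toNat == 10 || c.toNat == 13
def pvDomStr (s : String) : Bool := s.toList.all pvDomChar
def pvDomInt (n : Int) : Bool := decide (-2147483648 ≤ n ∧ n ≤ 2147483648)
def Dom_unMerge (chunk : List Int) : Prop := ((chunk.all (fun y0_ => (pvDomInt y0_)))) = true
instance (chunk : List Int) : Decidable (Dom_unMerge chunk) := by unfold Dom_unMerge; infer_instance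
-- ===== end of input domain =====

-- B rebuilds the same permutation with an explicit stack (pre-order split list)
-- and one bottom-up recombination pass instead of recursion; return values are
-- proved equal. Side effects: both Pythons reverse a length-2 argument in place.

-- ===== PORT A =====

-- hand port of the step-2 slices: takeEvery2 l = l[::2], takeEvery2 l.tail = l[1::2] (exact for step 2)
def takeEvery2 : List Int → List Int
  | [] => []
  | [x] => [x]
  | x :: _ :: rest => x :: takeEvery2 rest

-- A's recursion, made structural by a fuel argument; fuel chunk.length is always
-- sufficient (each recursive call strictly shrinks the list), so the fuel-0 branch
-- is never reached from unMerge
def unMergeFuel : Nat → List Int → List Int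
  | 0, c => c
  | n + 1, c =>
    if c.length > 2 then
      unMergeFuel n (takeEvery2 c) ++ unMergeFuel n (takeEvery2 c.tail)
    else if c.length = 2 then
      c.reverse
    else
      c

def unMerge (chunk : List Int) : List Int := unMergeFuel chunk.length chunk

-- ===== PORT B =====

-- phase 1: the while-loop over `stack`, collecting `nodes` (pre-order of the split tree);
-- fuel is only a totality guard — 3 * (total length) steps always suffice
def buildNodesFuel : Nat → List (List Int) → List (List Int)
  | 0, _ => []
  | _ + 1, [] => []
  | n + 1, c :: rest =>
    if c.length > 2 then
      c :: buildNodesFuel n (takeEvery2 c :: takeEvery2 c.tail :: rest)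
    else
      c :: buildNodesFuel n rest

-- phase 2 step: one iteration of the `for c in reversed(nodes)` loop on the `done` stack
def combineStep (done : List (List Int)) (c : List Int) : List (List Int) :=
  if c.length > 2 then
    match done with
    | l :: r :: rest => (l ++ r) :: rest
    | _ => done          -- unreachable: the invariant keeps ≥ 2 results on the stack here
  else if c.length = 2 then
    c.reverse :: done
  else
    c :: done

def unMerge_alt (chunk : List Int) : List Int :=
  if chunk.length ≤ 1 then chunk
  else if chunk.length = 2 then chunk.reverse
  else ((buildNodesFuel (3 * chunk.length) [chunk]).reverse.foldl combineStep []).headD []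

-- ===== PRECONDITION & SPEC =====
def Spec_unMerge (chunk : List Int) (out : List Int) : Prop := out = unMerge_alt chunk
instance (chunk : List Int) (out : List Int) : Decidable (Spec_unMerge chunk out) := by unfold Spec_unMerge; infer_instance

-- ===== CLAIM (what is proved, stated in full; the proofs are below) =====
def Claim_equal_unMerge : Prop := ∀ (chunk : List Int), Dom_unMerge chunk → Spec_unMerge chunk (unMerge chunk)

-- ===== LEMMAS AND PROOFS =====

theorem length_takeEvery2 (l : List Int) : (takeEvery2 l).length = (l.length + 1) / 2 := by
  fun_induction takeEvery2 l
  · simp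
  · simp
  · simp [takeEvery2, *]; omega

-- proof-side reference: A's recursion written directly (well-founded on the length)
def uRef (chunk : List Int) : List Int :=
  if chunk.length > 2 then
    uRef (takeEvery2 chunk) ++ uRef (takeEvery2 chunk.tail)
  else if chunk.length = 2 then
    chunk.reverse
  else
    chunk
termination_by chunk.length
decreasing_by
  · have := length_takeEvery2 chunk; omega
  · have h1 := length_takeEvery2 chunk.tail
    have h2 : chunk.tail.length = chunk.length - 1 := by simp
    omega

theorem uRef_eq (c : List Int) :
    uRef c = if c.length > 2 then uRef (takeEvery2 c) ++ uRef (takeEvery2 c.tail)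
             else if c.length = 2 then c.reverse else c := by
  rw [uRef]

-- any sufficient fuel computes uRef
theorem unMergeFuel_eq_uRef : ∀ (n : Nat) (c : List Int), c.length ≤ n → unMergeFuel n c = uRef c := by
  intro n
  induction n with
  | zero =>
    intro c hc
    have : c.length = 0 := by omega
    rw [unMergeFuel, uRef_eq]
    simp [this]
  | succ n ih =>
    intro c hc
    rw [unMergeFuel, uRef_eq]
    by_cases h : c.length > 2
    · have hL := length_takeEvery2 c
      have hR := length_takeEvery2 c.tail
      have ht : c.tail.length = c.length - 1 := by simp
      rw [if_pos h, if_pos h, ih _ (by omega), ih _ (by omega)]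
    · rw [if_neg h, if_neg h]

-- proof-side reference for phase 1 (well-founded on the stack measure)
def bnRef (stack : List (List Int)) : List (List Int) :=
  match stack with
  | [] => []
  | c :: rest =>
    if c.length > 2 then
      c :: bnRef (takeEvery2 c :: takeEvery2 c.tail :: rest)
    else
      c :: bnRef rest
termination_by (stack.map (fun l => 3 * l.length - 2)).sum + stack.length
decreasing_by
  · have h1 := length_takeEvery2 c
    have h2 := length_takeEvery2 c.tail
    have h3 : c.tail.length = c.length - 1 := by simp
    simp only [List.map_cons, List.sum_cons, List.length_cons]
    omega
  · simp only [List.map_cons, List.sum_cons, List.length_cons]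
    omega

theorem bnRef_eq (c : List Int) (rest : List (List Int)) :
    bnRef (c :: rest) =
      if c.length > 2 then c :: bnRef (takeEvery2 c :: takeEvery2 c.tail :: rest)
      else c :: bnRef rest := by
  rw [bnRef]

def bnMeasure (stack : List (List Int)) : Nat :=
  (stack.map (fun l => 3 * l.length - 2)).sum + stack.length

-- any sufficient fuel computes bnRef
theorem buildNodesFuel_eq_bnRef : ∀ (n : Nat) (stack : List (List Int)), bnMeasure stack ≤ n →
    buildNodesFuel n stack = bnRef stack := by
  intro n
  induction n with
  | zero =>
    intro stack hs
    cases stack with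
    | nil => rw [buildNodesFuel, bnRef]
    | cons c rest =>
      exfalso
      simp only [bnMeasure, List.map_cons, List.sum_cons, List.length_cons] at hs
      omega
  | succ n ih =>
    intro stack hs
    cases stack with
    | nil => rw [buildNodesFuel, bnRef]
    | cons c rest =>
      rw [buildNodesFuel, bnRef_eq]
      have h1 := length_takeEvery2 c
      have h2 := length_takeEvery2 c.tail
      have h3 : c.tail.length = c.length - 1 := by simp
      have hsum : (takeEvery2 c).length + (takeEvery2 c.tail).length = c.length := by omega
      by_cases h : c.length > 2
      · have hLb : 2 ≤ (takeEvery2 c).length := by omega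
        have hRb : 1 ≤ (takeEvery2 c.tail).length := by omega
        have hm : bnMeasure (takeEvery2 c :: takeEvery2 c.tail :: rest) ≤ n := by
          simp only [bnMeasure, List.map_cons, List.sum_cons, List.length_cons] at hs ⊢
          omega
        rw [if_pos h, if_pos h, ih _ hm]
      · have hm : bnMeasure rest ≤ n := by
          simp only [bnMeasure, List.map_cons, List.sum_cons, List.length_cons] at hs ⊢
          omega
        rw [if_neg h, if_neg h, ih _ hm]

theorem combineStep_big {c : List Int} (h : c.length > 2) (l r : List Int) (rest : List (List Int)) :
    combineStep (l :: r :: rest) c = (l ++ r) :: rest := by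
  simp [combineStep, h]

theorem combineStep_small {c : List Int} (h : ¬ c.length > 2) (done : List (List Int)) :
    combineStep done c = (if c.length = 2 then c.reverse else c) :: done := by
  by_cases h2 : c.length = 2 <;> simp [combineStep, h, h2]

-- the stack loop processes its top item's whole subtree before the rest
theorem bnRef_cons (c : List Int) (rest : List (List Int)) :
    bnRef (c :: rest) = bnRef [c] ++ bnRef rest := by
  induction hn : c.length using Nat.strong_induction_on generalizing c rest with
  | _ n ih =>
  subst hn
  by_cases h : c.length > 2
  · have hL : (takeEvery2 c).length < c.length := by have := length_takeEvery2 c; omega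
    have hR : (takeEvery2 c.tail).length < c.length := by
      have := length_takeEvery2 c.tail
      have : c.tail.length = c.length - 1 := by simp
      omega
    rw [bnRef_eq c rest, bnRef_eq c [], if_pos h, if_pos h,
        ih _ hL _ (takeEvery2 c.tail :: rest) rfl,
        ih _ hR _ rest rfl,
        ih _ hL _ [takeEvery2 c.tail] rfl]
    simp
  · rw [bnRef_eq c rest, bnRef_eq c [], if_neg h, if_neg h]
    simp [bnRef]

-- folding the recombination step over a subtree's reversed pre-order pushes exactly uRef of its root
theorem foldl_combine (c : List Int) (done : List (List Int)) :
    (bnRef [c]).reverse.foldl combineStep done = uRef c :: done := by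
  induction hn : c.length using Nat.strong_induction_on generalizing c done with
  | _ n ih =>
  subst hn
  by_cases h : c.length > 2
  · have hL : (takeEvery2 c).length < c.length := by have := length_takeEvery2 c; omega
    have hR : (takeEvery2 c.tail).length < c.length := by
      have := length_takeEvery2 c.tail
      have : c.tail.length = c.length - 1 := by simp
      omega
    rw [bnRef_eq c [], if_pos h, bnRef_cons (takeEvery2 c) [takeEvery2 c.tail]]
    simp only [List.reverse_cons, List.reverse_append, List.foldl_append]
    rw [ih _ hR _ done rfl, ih _ hL _ (uRef (takeEvery2 c.tail) :: done) rfl]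
    simp only [List.foldl_cons, List.foldl_nil]
    rw [combineStep_big h, uRef_eq c, if_pos h]
  · rw [bnRef_eq c [], if_neg h]
    simp only [bnRef, List.reverse_cons, List.reverse_nil, List.nil_append,
      List.foldl_cons, List.foldl_nil]
    rw [combineStep_small h, uRef_eq c, if_neg h]

-- ===== VERDICT (by name: the statement is the Claim_ definition above) =====
theorem unMerge_spec : Claim_equal_unMerge := by
  intro chunk _
  unfold Spec_unMerge unMerge_alt unMerge
  rw [unMergeFuel_eq_uRef chunk.length chunk le_rfl]
  by_cases h1 : chunk.length ≤ 1
  · rw [if_pos h1, uRef_eq]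
    have : ¬ chunk.length > 2 := by omega
    have : ¬ chunk.length = 2 := by omega
    simp [*]
  · rw [if_neg h1]
    by_cases h2 : chunk.length = 2
    · rw [if_pos h2, uRef_eq]
      have : ¬ chunk.length > 2 := by omega
      simp [*]
    · rw [if_neg h2, buildNodesFuel_eq_bnRef _ _ (by simp [bnMeasure]; omega), foldl_combine]
      simp
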